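/- GENERATED by tools/from_farm_form.py from prooffarm-gif/accepted/GifFreeSavedImages.3/Proof.lean (a worked proof of the farm's unit `GifFreeSavedImages.3`,
   accepted by the verdict) — do not edit. -/
import Gif.Spec.Units.GifFreeSavedImages_3
import Gif.Spec.AllSegs

open X86 X86.User Asan ProgX.Base ProgX.Base.Spec Gif.Spec

set_option maxRecDepth 4000
set_option maxHeartbeats 4000000

/-!
  Segment 3 of `GifFreeSavedImages` (107F87H … 107FA5H, 9 instructions; gifalloc.c:451-453): the loop's exit.

      AtExit ─ mov rdi, r12 ─ free(gif.SavedImages) ─ ret10 ─ lea rdi, [rbp + 72] ─ check ─ ret11 ─ gif.SavedImages = NULL ─ 3 pops ─ ret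

  The `free` is entered with the heap after the last round, `heapAt H s length` (pre: `HeapPre.at_push` from the assertion's `HeapInv`
  over the pushed return address; the array is live: `liveAt_end`); it returns the heap with the array released, which is the
  contract's final heap (`heapAt_end`). gif is another owned object (`Owns.of_cons`): still live, so the checked store is justified
  and keeps the heap's invariant (`HeapInv.sameExcept_stack_live`), restated at the caller's stack pointer (`HeapPre.raise_back`).
  `Shape` and `Owns` move separately: the footprint of the `free` is loose (`Loose.free`), the store is a window of gif that only the
  `saved` component reads: `closeShape_of_carry` gives the post's `CloseShape`, and every window misses the cursor (`seg3_close`).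
-/

namespace Gif.Spec.GifFreeSavedImages_3

/-- **The post's shape and measure at the `ret`** (a pure fact over two memories): `m` has the shape of the forest after `k`
rounds; `m'` differs from it in the footprint of `free(s.arr)` (a stack window below the cursor, the state word of the array's
header, the array's shadow: loose windows, `Loose.free`) and in `gif.SavedImages` (`carry_Off.in_gif … 72 80`), which holds NULL:
`CloseShape F R m'` (`closeShape_of_carry`), and no input was read (every window misses the cursor). -/
theorem seg3_close {Hc : Heap} {F : Forest} {R : Rd} {s : Saved} {k : Nat} {m m' : Mem} {lo hi : Nat}
    (hshape : Shape (GifFreeSavedImages.forestAt F s k) R m) (hplaced : Placed Hc F.owned) (hsaved : F.saved = some s)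
    (hok : HeapOK Hc m) (hcur : 0x700000 ≤ R.cur ∧ R.cur + 16 ≤ 0x800000) (halive : Hc.Live s.arr (56 * s.cap))
    (hlo : 0x700000 ≤ lo) (hhi : hi ≤ R.cur)
    (hs : Mem.SameExcept [⟨lo, hi⟩, ⟨s.arr - 24, s.arr - 16⟩,
      ⟨0xC00000 + s.arr / 8, 0xC00000 + (s.arr + 56 * s.cap + 7) / 8⟩, ⟨F.gif + 72, F.gif + 80⟩] m m')
    (h0 : GifFileType.SavedImages m' F.gif = 0) :
    CloseShape F R m' ∧ rem R m' = rem R m := by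
  have hpx : Placed Hc (GifFreeSavedImages.forestAt F s k).owned := GifFreeSavedImages.placedAt hplaced hsaved k
  have G : carry_Geo Hc (GifFreeSavedImages.forestAt F s k) R := carry_Geo.intro hshape hpx hok hcur
  have hloose := Loose.free (F := GifFreeSavedImages.forestAt F s k) (R := R) (lo := lo) (hi := hi) hok hcur halive hlo hhi
  have hoff : ∀ w, w ∈ [(⟨lo, hi⟩ : Span), ⟨s.arr - 24, s.arr - 16⟩,
      ⟨0xC00000 + s.arr / 8, 0xC00000 + (s.arr + 56 * s.cap + 7) / 8⟩, ⟨F.gif + 72, F.gif + 80⟩] →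
      carry_Off (GifFreeSavedImages.forestAt F s k) R True True False True True w := by
    intro w hw
    simp only [List.mem_cons, List.not_mem_nil, or_false] at hw
    rcases hw with rfl | rfl | rfl | rfl
    · exact carry_Off.of_loose G (hloose _ (by simp only [List.mem_cons, true_or]))
    · exact carry_Off.of_loose G (hloose _ (by simp only [List.mem_cons, true_or, or_true]))
    · exact carry_Off.of_loose G (hloose _ (by simp only [List.mem_cons, true_or, or_true]))
    · refine carry_Off.in_gif G 72 80 ?_ ?_ (by omega) (fun _ => by omega) (fun _ => by omega) (fun x => absurd x id)
        (fun _ => by omega)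
      · rw [GifFreeSavedImages.forestAt_gif]
        exact Nat.le_refl _
      · rw [GifFreeSavedImages.forestAt_gif]
        exact Nat.le_refl _
  refine ⟨GifFreeSavedImages.closeShape_of_carry hshape G hs hoff rfl rfl rfl rfl rfl h0, ?_⟩
  apply rem_frame _ (by omega)
  apply hs.eqOn
  intro w hw
  have hc := (hoff w hw).cursor trivial
  omega

end Gif.Spec.GifFreeSavedImages_3

/-- Segment 3 of `GifFreeSavedImages`: from `AtExit` (107F87H, l.451) over `free(gif.SavedImages)` and the checked store
`gif.SavedImages = NULL` to the `ret`: the contract's `Returned`. -/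
theorem Gif.Spec.Proved.GifFreeSavedImages_3_ok : Gif.Spec.GifFreeSavedImages_3.Statement := by
  intro Lay hLay μ hμ u₀ hcode h_free h_store8 H rest frames F R s e ret v hat
  -- THE CARRIED ENTRY (facts about `e`) and the present state `v` (107F87H, l.451) under the names the walker reads
  obtain ⟨hloop, hr12⟩ := hat
  have he := hloop.entry
  v_entry he
  obtain ⟨henv, hrdi, hsn⟩ := hloop.pre
  have w_rip := hloop.rip
  have c_rsp : v.reg .rsp = e.reg .rsp - 24 := hloop.rsp
  have c_rbp : v.reg .rbp = e.reg .rdi := hloop.rbp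
  have w_kept : RegsKept [.rsp] v v := RegsKept.refl _ _
  have w_eq : Mem.EqOn ProgX.Base.L.textLo ProgX.Base.L.textHi u₀.mem v.mem := ProgX.Base.conv_code_eqOn hloop.code
  have hdf : v.flags .df = false := (show abiInv _ from hloop.abi).1
  have hmx : v.mxcsr &&& 0x1F80 = 0x1F80 := (show abiInv _ from hloop.abi).2
  have hsse : SseOK v := ProgX.Base.sseOK_of_abiInv hloop.abi
  -- THE HEAP AFTER THE LAST ROUND: its region, the cursor's range, the array and gif are live, where they are
  -- (`Heap.Live.range`: one inequality per hypothesis, no `% 16` clause)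
  have hinv := hloop.inv
  have hreg : SameRegion H (GifFreeSavedImages.heapAt H s s.imgs.length) := SameRegion.releaseAll H _
  have hbase : (GifFreeSavedImages.heapAt H s s.imgs.length).base = 0x800000 := hreg.1.trans henv.heap.base
  obtain ⟨hcur1, hcur2, hcur3⟩ := henv.ctx.cursor_range hinv.shadow
  have hown := hloop.owns
  rw [GifFreeSavedImages.liveAt_end] at hown
  have halive : (GifFreeSavedImages.heapAt H s s.imgs.length).Live s.arr (56 * s.cap) := hown.live _ List.mem_cons_self
  have hglive : (GifFreeSavedImages.heapAt H s s.imgs.length).Live F.gif 120 :=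
    hown.live _ (List.mem_cons_of_mem _ List.mem_cons_self)
  obtain ⟨hgr1, hgr2⟩ := hglive.range hbase hinv.heap
  obtain ⟨har1, har2⟩ := halive.range hbase hinv.heap
  -- the instance of `free`'s contract the walker applies at 0x107f8a
  have hfree1 := h_free (GifFreeSavedImages.heapAt H s s.imgs.length) rest frames (56 * s.cap)
  u_walk hcode [hμ.vendor] until [Gif.L.GifFreeSavedImages.ret11] span [ProgX.Base.L.textLo, ProgX.Base.L.textHi] side (v_side)
  case call_inv =>
    v_inv
  case pre_107f8a =>
    -- 0x107f8a (l.451) `free(gif.SavedImages)`: the heap's precondition over the pushed return address; the array is live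
    refine ⟨HeapPre.at_push henv.heap hreg hinv w_rsp w_mem (by u_omega), Or.inr ?_⟩
    rw [w_rdi, hr12]
    exact halive
  -- 0x107f8f (ret10): `free(gif.SavedImages)` has returned
  have hne1 : (s_107f8a.reg .rdi).toNat ≠ 0 := by
    rw [w_rdi_107f8a, hr12]
    omega
  have hinv1 := w_post.2 hne1
  have e8 : (s_107f8a.reg .rsp).toNat + 8 = (e.reg .rsp).toNat - 24 := by
    rw [w_rsp_107f8a]
    u_omega
  rw [w_rdi_107f8a, hr12, e8] at hinv1
  clear w_post
  v_after_call w_rsp_107f8a w_mem_107f8a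
  simp only [shadowSpan, w_rdi_107f8a, hr12] at w_same
  -- the saved registers' slots and the return address, through the callee's footprint
  -- (without `he_align`: with it `omega` fails on the shadow window of the array)
  have k_r12 : v.mem.readLE (e.reg .rsp - 8) 8 = (e.reg .r12).toNat := hloop.slot_r12
  have k_rbp : v.mem.readLE (e.reg .rsp - 16) 8 = (e.reg .rbp).toNat := hloop.slot_rbp
  have k_rbx : v.mem.readLE (e.reg .rsp - 24) 8 = (e.reg .rbx).toNat := hloop.slot_rbx
  have k_ra : UInt64.ofNat (v.mem.readLE (e.reg .rsp) 8) = ret := hloop.slot_ra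
  have hs12 : s_107f8ar.mem.readLE (e.reg .rsp - 8) 8 = (e.reg .r12).toNat := by
    clear he_align
    u_frame k_r12
  have hsbp : s_107f8ar.mem.readLE (e.reg .rsp - 16) 8 = (e.reg .rbp).toNat := by
    clear he_align
    u_frame k_rbp
  have hsbx : s_107f8ar.mem.readLE (e.reg .rsp - 24) 8 = (e.reg .rbx).toNat := by
    clear he_align
    u_frame k_rbx
  have hsra : UInt64.ofNat (s_107f8ar.mem.readLE (e.reg .rsp) 8) = ret := by
    clear he_align
    u_frame k_ra
  -- … in the form the walker rewrites the three pops with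
  have q_r12 : UInt64.ofNat (s_107f8ar.mem.readLE (e.reg .rsp - 8) 8) = e.reg .r12 := by
    rw [hs12, UInt64.ofNat_toNat]
  have q_rbp : UInt64.ofNat (s_107f8ar.mem.readLE (e.reg .rsp - 16) 8) = e.reg .rbp := by
    rw [hsbp, UInt64.ofNat_toNat]
  have q_rbx : UInt64.ofNat (s_107f8ar.mem.readLE (e.reg .rsp - 24) 8) = e.reg .rbx := by
    rw [hsbx, UInt64.ofNat_toNat]
  -- what was written since the cut: stack below the stack pointer, the state word of the array's header, the array's shadow
  have hs1 : Mem.SameExcept [⟨(e.reg .rsp).toNat - 56, (e.reg .rsp).toNat - 24⟩, ⟨s.arr - 24, s.arr - 16⟩,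
      ⟨0xC00000 + s.arr / 8, 0xC00000 + (s.arr + 56 * s.cap + 7) / 8⟩] v.mem s_107f8ar.mem := by
    u_same
  -- the heap after the `free`: gif is still live
  obtain ⟨-, -, hane⟩ := hown.of_cons
  have hgne : s.arr ≠ F.gif := hane (F.gif, 120) List.mem_cons_self
  have hglive2 : ((GifFreeSavedImages.heapAt H s s.imgs.length).release s.arr).Live F.gif 120 :=
    hglive.release_ne (Ne.symm hgne)
  -- THE WALK TO THE `ret`: the checked store (l.452), three pops, `ret` (l.453)
  u_walk hcode [hμ.vendor] span [ProgX.Base.L.textLo, ProgX.Base.L.textHi] side (v_side)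
  case check_107f93 =>
    -- 0x107f93 (l.452): the store of `gif.SavedImages` lies inside gif, live in the heap after the `free`
    have hun : ShadowUntouched s_107f8ar.mem s_107f93.mem := by v_untouched
    have hl : LiveIn (((GifFreeSavedImages.heapAt H s s.imgs.length).release s.arr).liveObjs ++ rest) frames F.gif 120 :=
      hglive2.liveIn rest frames (Nat.le_refl _) (Nat.le_refl _)
    exact hl.accSmall hinv1.shadow hun _ 8 (by decide) (by u_omega) (by u_omega)
  -- 0x107fa4: the `ret` has been executed
  -- the heap's invariant through the check's return address (stack) and the store into gif (a live object)
  have hbase2 : ((GifFreeSavedImages.heapAt H s s.imgs.length).release s.arr).base = 0x800000 := hbase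
  have hun2 : ShadowUntouched s_107f8ar.mem s_107fa4.mem := by v_untouched
  have hs2 : Mem.SameExcept [⟨(e.reg .rsp).toNat - 24 - 8, (e.reg .rsp).toNat - 24⟩, ⟨F.gif + 72, F.gif + 72 + 8⟩]
      s_107f8ar.mem s_107fa4.mem := by
    rw [w_mem]
    u_same
  have hinv2 : HeapInv ((GifFreeSavedImages.heapAt H s s.imgs.length).release s.arr) rest frames ((e.reg .rsp).toNat - 24)
      s_107fa4.mem :=
    hinv1.sameExcept_stack_live hbase2 hun2 (by omega) hglive2 (by omega) (by omega) hs2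
  -- what was written since the cut, all of it: the footprint of the `free`, and `gif.SavedImages`
  have hs3 : Mem.SameExcept [⟨(e.reg .rsp).toNat - 56, (e.reg .rsp).toNat - 24⟩, ⟨s.arr - 24, s.arr - 16⟩,
      ⟨0xC00000 + s.arr / 8, 0xC00000 + (s.arr + 56 * s.cap + 7) / 8⟩, ⟨F.gif + 72, F.gif + 80⟩] v.mem s_107fa4.mem := by
    rw [w_mem]
    u_same
  -- `gif.SavedImages` holds NULL: the store is the outermost write
  have h0 : GifFileType.SavedImages s_107fa4.mem F.gif = 0 := by
    simp only [gfield]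
    rw [w_mem, rd_writeLE_same _ _ 8 0 (F.gif + 72) (by u_omega) (by omega)]
  -- the post's shape and measure (`seg3_close`)
  obtain ⟨hclose, hrem⟩ := Gif.Spec.GifFreeSavedImages_3.seg3_close hloop.shape hloop.placed hloop.saved hinv.heap
    ⟨hcur1, hcur2⟩ halive (by omega) (by omega) hs3 h0
  have habi : (conv u₀).inv s_107fa4 := by
    have x_df : s_107fa4.flags .df = false := by
      rw [w_flags]
      exact w_df_107f93
    have x_mx : s_107fa4.mxcsr &&& 0x1F80 = 0x1F80 := by
      rw [w_mxcsr]
      exact w_mx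
    exact ProgX.Base.abiInv_of x_df x_mx
  have hsame0 := hloop.same
  refine ReachVia.done ?_
  refine X86.User.Returned.mk w_rip w_rsp ?_ ?_ (ProgX.Base.conv_code_in w_eq) habi ?_
  · -- saved: rbx, rbp, r12 popped back; r13, r14, r15 never touched
    intro r hr
    cases r <;> first
      | exact absurd hr (by decide)
      | (with_reducible assumption)
      | exact (w_kept.get .r13 rfl).trans hloop.r13
      | exact (w_kept.get .r14 rfl).trans hloop.r14
      | exact (w_kept.get .r15 rfl).trans hloop.r15
  · -- same: the carried footprint (`hsame0`), the callee's footprint, the store into gif (above 800000H)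
    simp only [X86.User.Spec.footprint, vspec]
    rw [w_mem]
    u_same
  · -- the postcondition: the final heap is the contract's (`heapAt_end`), at the caller's stack pointer (`raise_back`)
    refine ⟨?_, hclose, ?_⟩
    · rw [hloop.saved, ← GifFreeSavedImages.heapAt_end]
      exact henv.heap.raise_back hinv2 (by omega)
    · rw [hrem]
      exact hloop.rem
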